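-- pv_equiv track=rewrite | github.com/anbreaker/bc4RomanNumbers | romanNumbers.py | numMillares
-- ===== SOURCE A (Python) =====
-- def numMillares(numR):
--     contarParentesis = 0
--     numEntreParentesis = ''
--     numPostParentesis = ''
--     pAnterior = ''
--     for p in numR:
--         if p == ('(') or p == (')'):
--             contarParentesis += 1
--             if p == (')'):
--                 pAnterior = p
--         elif pAnterior != (')'):
--             numEntreParentesis += p
--         elif pAnterior == (')'):
--                 numPostParentesis += p
--     return contarParentesis, numEntreParentesis, numPostParentesis
-- ===== SOURCE B (Python) =====
-- def numMillares(numR):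
--     before, _, after = numR.partition(')')
--     count = sum(c in '()' for c in numR)
--     entre = ''.join(c for c in before if c not in '()')
--     post = ''.join(c for c in after if c not in '()')
--     return count, entre, post
-- ===== Notes on version B (the rewrite author's own statement) =====
-- stated objective: simpler
-- what changed: Replaces A's single stateful loop (counter + two accumulators + a 'previous char' flag) by a declarative decomposition: partition at the first closing paren, count paren chars with one sum, and filter each half with a comprehension.
import Mathlib
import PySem

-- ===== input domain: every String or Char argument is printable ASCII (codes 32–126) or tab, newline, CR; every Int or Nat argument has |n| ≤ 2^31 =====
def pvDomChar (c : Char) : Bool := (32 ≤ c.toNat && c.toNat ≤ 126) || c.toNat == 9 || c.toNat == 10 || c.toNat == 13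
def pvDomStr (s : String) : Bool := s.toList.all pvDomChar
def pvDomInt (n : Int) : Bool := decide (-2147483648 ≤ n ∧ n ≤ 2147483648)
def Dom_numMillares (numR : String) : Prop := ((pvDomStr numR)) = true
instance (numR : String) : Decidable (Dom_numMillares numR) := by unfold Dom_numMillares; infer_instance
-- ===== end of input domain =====

-- B replaces A's single stateful loop by partition at the first closing paren plus a count and two filters (simpler decomposition, same cost).


-- ===== PORT A =====
-- one fold over the characters; state = (contarParentesis, numEntreParentesis, numPostParentesis, pAnterior)
def pvStepA (s : Int × List Char × List Char × String) (p : Char) : Int × List Char × List Char × String :=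
  let (c, e, q, pa) := s
  if p = '(' ∨ p = ')' then
    (c + 1, e, q, if p = ')' then ")" else pa)
  else if pa ≠ ")" then
    (c, e ++ [p], q, pa)
  else if pa = ")" then
    (c, e, q ++ [p], pa)
  else
    (c, e, q, pa)

def numMillares (numR : String) : Int × String × String :=
  let st := numR.toList.foldl pvStepA (0, [], [], "")
  (st.1, String.ofList st.2.1, String.ofList st.2.2.1)

-- ===== PORT B =====
-- hand port of numR.partition(')') for the single-char separator ')': exact — (part before first ')', part after it), both halves empty separator-free split as Python returns (we drop the middle component, unused by Source B)
def pvPartClose : List Char → List Char × List Char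
  | [] => ([], [])
  | c :: cs =>
    if c = ')' then ([], cs)
    else
      let (b, a) := pvPartClose cs
      (c :: b, a)

def pvIsParen (c : Char) : Bool := c = '(' ∨ c = ')'

def numMillares_alt (numR : String) : Int × String × String :=
  let s := numR.toList
  let p := pvPartClose s
  let count : Int := (s.countP pvIsParen : Nat)
  let entre := p.1.filter (fun c => ¬ pvIsParen c)
  let post := p.2.filter (fun c => ¬ pvIsParen c)
  (count, String.ofList entre, String.ofList post)

-- ===== PRECONDITION & SPEC =====
def Spec_numMillares (numR : String) (out : Int × String × String) : Prop := out = numMillares_alt numR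
instance (numR : String) (out : Int × String × String) : Decidable (Spec_numMillares numR out) := by unfold Spec_numMillares; infer_instance

-- ===== CLAIM (what is proved, stated in full; the proofs are below) =====
def Claim_equal_numMillares : Prop := ∀ (numR : String), Dom_numMillares numR → Spec_numMillares numR (numMillares numR)

-- ===== LEMMAS AND PROOFS =====

-- once pAnterior = ")", every non-paren char is appended to the post accumulator
theorem pvFoldA_after (l : List Char) (c : Int) (e q : List Char) :
    l.foldl pvStepA (c, e, q, ")") =
      (c + (l.countP pvIsParen : Nat), e, q ++ l.filter (fun x => ¬ pvIsParen x), ")") := by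
  induction l generalizing c q with
  | nil => simp
  | cons h t ih =>
    by_cases hp : pvIsParen h
    · have hstep : pvStepA (c, e, q, ")") h = (c + 1, e, q, ")") := by
        simp only [pvIsParen, decide_eq_true_eq] at hp
        rcases hp with hp | hp <;> simp [pvStepA, hp]
      simp only [List.foldl_cons, hstep, ih, List.countP_cons, List.filter_cons, hp]
      simp
      ring
    · have hstep : pvStepA (c, e, q, ")") h = (c, e, q ++ [h], ")") := by
        simp only [pvIsParen, decide_eq_true_eq, not_or] at hp
        simp [pvStepA, hp.1, hp.2]
      simp only [List.foldl_cons, hstep, ih, List.countP_cons, List.filter_cons, hp]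
      simp

-- before any ')' is seen (pAnterior = ""), non-paren chars go to entre; the first ')' switches phases exactly where pvPartClose cuts
theorem pvFoldA_before (l : List Char) (c : Int) (e q : List Char) :
    l.foldl pvStepA (c, e, q, "") =
      (c + (l.countP pvIsParen : Nat),
       e ++ (pvPartClose l).1.filter (fun x => ¬ pvIsParen x),
       q ++ (pvPartClose l).2.filter (fun x => ¬ pvIsParen x),
       if ')' ∈ l then ")" else "") := by
  induction l generalizing c e with
  | nil => simp [pvPartClose]
  | cons h t ih =>
    by_cases hc : h = ')'
    · subst hc
      have hstep : pvStepA (c, e, q, "") ')' = (c + 1, e, q, ")") := by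
        simp [pvStepA]
      simp only [List.foldl_cons, hstep, pvFoldA_after, pvPartClose, List.countP_cons]
      simp [pvIsParen]
      ring
    · by_cases hp : pvIsParen h
      · have ho : h = '(' := by
          simp only [pvIsParen, decide_eq_true_eq] at hp
          tauto
        subst ho
        have hstep : pvStepA (c, e, q, "") '(' = (c + 1, e, q, "") := by
          simp [pvStepA]
        simp only [List.foldl_cons, hstep, ih, pvPartClose, List.countP_cons, List.mem_cons]
        have : ('(' : Char) ≠ ')' := by decide
        simp [this, pvIsParen]
        ring
      · have hstep : pvStepA (c, e, q, "") h = (c, e ++ [h], q, "") := by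
          simp only [pvIsParen, decide_eq_true_eq, not_or] at hp
          simp [pvStepA, hp.1, hp.2]
        simp only [List.foldl_cons, hstep, ih, pvPartClose, List.mem_cons, List.countP_cons, hp]
        have hne : ¬ (')' = h) := fun he => hc he.symm
        simp [hne, hc, hp]

-- ===== VERDICT (by name: the statement is the Claim_ definition above) =====
theorem numMillares_spec : Claim_equal_numMillares := by
  intro numR _
  unfold Spec_numMillares numMillares numMillares_alt
  simp only [pvFoldA_before, List.nil_append]
  simp
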